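-- pv_equiv track=rewrite | github.com/Emericdefay/zos-wallpaper-maker | Widgets/ussmaker.py | regroup_pixels
-- ===== SOURCE A (Python) =====
-- def regroup_pixels(pixels):
--     """
--         Methode qui prend une liste d'objets représentant des pixels et
--         retourne une liste d'objets regroupés selon leur couleur
--     """
--     result = []
--     current_object = None
--     for pixel in pixels:
--         if current_object is None:
--             # On commence un nouvel objet si on en a pas encore créé un
--             current_object = pixel
--         elif pixel['c'] == current_object['c']:
--             # Si la couleur de l'objet courant est la même que celle de l'objet en cours,
--             # on concatène les symboles des deux objets
--             current_object['s'] += pixel['s']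
--         else:
--             # Si la couleur de l'objet courant est différente de celle de l'objet en cours,
--             # on ajoute l'objet en cours à la liste résultat et on crée un nouvel objet à partir de l'objet courant
--             if current_object['c'] != "#000000":  # On ignore les objets noirs
--                 result.append(current_object)
--             current_object = pixel
--
--     # On ajoute l'objet en cours s'il n'est pas noir
--     if current_object is not None and current_object['c'] != "#000000":
--         result.append(current_object)
--     return result
-- ===== SOURCE B (Python) =====
-- def regroup_pixels(pixels):
--     """Group-then-merge rewrite: first split the list into maximal runs of
--     equal color, then merge each run into its first pixel (mutated in place,
--     like the original) and keep the non-black ones."""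
--     runs = []
--     i, n = 0, len(pixels)
--     while i < n:
--         j = i + 1
--         while j < n and pixels[j]['c'] == pixels[i]['c']:
--             j += 1
--         runs.append(pixels[i:j])
--         i = j
--     result = []
--     for run in runs:
--         first = run[0]
--         for p in run[1:]:
--             first['s'] += p['s']
--         if first['c'] != "#000000":
--             result.append(first)
--     return result
-- ===== Notes on version B (the rewrite author's own statement) =====
-- stated objective: alternative
-- what changed: Replaces the single-pass current_object/None state machine with a two-phase group-then-merge: an index scan first cuts the list into maximal runs of equal color, then each run is merged into its first pixel and non-black results are kept.
import Mathlib
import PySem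

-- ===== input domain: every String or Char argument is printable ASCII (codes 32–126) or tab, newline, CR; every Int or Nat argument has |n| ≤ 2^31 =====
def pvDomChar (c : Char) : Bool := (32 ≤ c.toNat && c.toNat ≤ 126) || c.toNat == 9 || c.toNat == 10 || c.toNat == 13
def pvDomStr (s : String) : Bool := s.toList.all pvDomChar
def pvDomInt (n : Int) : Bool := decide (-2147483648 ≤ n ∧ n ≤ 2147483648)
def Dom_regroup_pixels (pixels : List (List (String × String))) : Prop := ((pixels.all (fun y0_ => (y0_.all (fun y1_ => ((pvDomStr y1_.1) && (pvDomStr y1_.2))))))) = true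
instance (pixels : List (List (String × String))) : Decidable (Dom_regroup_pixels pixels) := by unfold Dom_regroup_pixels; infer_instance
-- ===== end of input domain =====

-- B replaces A's current_object state machine by a group-then-merge pass (same cost);
-- both Pythons mutate the first pixel dict of each run in place — the equivalence proved here is about the return value.

-- ===== PORT A =====
-- pixel['k'] lookups / assignments go through PySem.Dict over the association list
def pxGetD (p : List (String × String)) (k dflt : String) : String :=
  (PySem.Dict.mk p).getD k dflt

def pxSet (p : List (String × String)) (k v : String) : List (String × String) :=
  ((PySem.Dict.mk p).insert k v).items

-- one iteration of A's for-loop: state = (result, current_object)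
def stepA (st : List (List (String × String)) × Option (List (String × String)))
    (pixel : List (String × String)) :
    List (List (String × String)) × Option (List (String × String)) :=
  match st.2 with
  | none => (st.1, some pixel)
  | some cur =>
    if pxGetD pixel "c" "" == pxGetD cur "c" "" then
      (st.1, some (pxSet cur "s" (pxGetD cur "s" "" ++ pxGetD pixel "s" "")))
    else
      ((if pxGetD cur "c" "" != "#000000" then st.1 ++ [cur] else st.1), some pixel)

-- A's trailing "add current_object if not black"
def finishA (st : List (List (String × String)) × Option (List (String × String))) :
    List (List (String × String)) :=
  match st.2 with
  | none => st.1
  | some cur => if pxGetD cur "c" "" != "#000000" then st.1 ++ [cur] else st.1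

def regroup_pixels (pixels : List (List (String × String))) : List (List (String × String)) :=
  finishA (pixels.foldl stepA ([], none))

-- ===== PORT B =====
-- phase 1 of Source B: the while loops cut pixels into maximal runs pixels[i:j] of equal color
def splitRuns : List (List (String × String)) → List (List (List (String × String)))
  | [] => []
  | p :: rest =>
    (p :: rest.takeWhile (fun q => pxGetD q "c" "" == pxGetD p "c" "")) ::
      splitRuns (rest.dropWhile (fun q => pxGetD q "c" "" == pxGetD p "c" ""))
  termination_by l => l.length
  decreasing_by
    simp only [List.length_cons]
    exact Nat.lt_succ_of_le (List.length_dropWhile_le _ _)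

-- phase 2 of Source B: fold the tail of a run into its first pixel (first['s'] += p['s'])
def mergeRun (run : List (List (String × String))) : List (String × String) :=
  match run with
  | [] => []
  | first :: rest =>
    rest.foldl (fun acc p => pxSet acc "s" (pxGetD acc "s" "" ++ pxGetD p "s" "")) first

def regroup_pixels_alt (pixels : List (List (String × String))) : List (List (String × String)) :=
  (splitRuns pixels).foldl
    (fun res run =>
      let first := mergeRun run
      if pxGetD first "c" "" != "#000000" then res ++ [first] else res) []

-- ===== PRECONDITION & SPEC =====
-- Pre_ = exactly the inputs where Python A returns (no KeyError): every pixel has key 'c',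
-- and both members of any adjacent same-color pair have key 's' (A reads 's' only inside multi-pixel runs).
def Pre_regroup_pixels (pixels : List (List (String × String))) : Prop :=
  (∀ p ∈ pixels, (PySem.Dict.mk p).contains "c" = true) ∧
  (∀ pq ∈ pixels.zip pixels.tail, pxGetD pq.1 "c" "" = pxGetD pq.2 "c" "" →
      (PySem.Dict.mk pq.1).contains "s" = true ∧ (PySem.Dict.mk pq.2).contains "s" = true)
instance (pixels : List (List (String × String))) : Decidable (Pre_regroup_pixels pixels) := by
  unfold Pre_regroup_pixels; infer_instance

def pvWitness_regroup_pixels : (List (List (String × String))) :=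
  [[("c", "#ff0000"), ("s", "a")], [("c", "#ff0000"), ("s", "b")], [("c", "#000000"), ("s", "x")]]

def Spec_regroup_pixels (pixels : List (List (String × String))) (out : List (List (String × String))) : Prop := out = regroup_pixels_alt pixels
instance (pixels : List (List (String × String))) (out : List (List (String × String))) : Decidable (Spec_regroup_pixels pixels out) := by unfold Spec_regroup_pixels; infer_instance

-- ===== CLAIM (what is proved, stated in full; the proofs are below) =====
def Claim_equal_regroup_pixels : Prop := ∀ (pixels : List (List (String × String))), Dom_regroup_pixels pixels → Pre_regroup_pixels pixels → Spec_regroup_pixels pixels (regroup_pixels pixels)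

-- ===== LEMMAS AND PROOFS =====

-- writing 's' does not change the color lookup
lemma pxGetD_pxSet_c (p : List (String × String)) (v : String) :
    pxGetD (pxSet p "s" v) "c" "" = pxGetD p "c" "" := by
  show ((PySem.Dict.mk p).insert "s" v).getD "c" "" = (PySem.Dict.mk p).getD "c" ""
  simp [PySem.Dict.getD_insert]

-- the output of B's second phase, as a flatMap
def outRuns (rs : List (List (List (String × String)))) : List (List (String × String)) :=
  rs.flatMap (fun run => if pxGetD (mergeRun run) "c" "" != "#000000" then [mergeRun run] else [])

lemma foldlB_eq_outRuns (rs : List (List (List (String × String)))) :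
    ∀ res, rs.foldl
      (fun res run =>
        let first := mergeRun run
        if pxGetD first "c" "" != "#000000" then res ++ [first] else res) res
      = res ++ outRuns rs := by
  induction rs with
  | nil => intro res; simp [outRuns]
  | cons r t ih =>
    intro res
    simp only [List.foldl_cons, outRuns, List.flatMap_cons, ih]
    split <;> simp

-- A's loop, started with current_object = cur and accumulator res, produces res ++ B's output on (cur :: l)
lemma loopA_eq (l : List (List (String × String))) :
    ∀ (cur : List (String × String)) (res : List (List (String × String))),
      finishA (l.foldl stepA (res, some cur)) = res ++ outRuns (splitRuns (cur :: l)) := by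
  induction l with
  | nil =>
    intro cur res
    simp [finishA, splitRuns, outRuns, mergeRun]
    split <;> simp
  | cons p t ih =>
    intro cur res
    by_cases h : pxGetD p "c" "" = pxGetD cur "c" ""
    · have hb : (pxGetD p "c" "" == pxGetD cur "c" "") = true := by simpa using h
      rw [List.foldl_cons]
      simp only [stepA, hb, if_true]
      rw [ih]
      -- the merged current object has the same color as cur
      have hc : pxGetD (pxSet cur "s" (pxGetD cur "s" "" ++ pxGetD p "s" "")) "c" ""
          = pxGetD cur "c" "" := pxGetD_pxSet_c cur _
      -- the two splitRuns agree
      congr 1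
      rw [splitRuns, splitRuns]
      have hpred : (fun q => pxGetD q "c" "" == pxGetD (pxSet cur "s" (pxGetD cur "s" "" ++ pxGetD p "s" "")) "c" "")
          = (fun q => pxGetD q "c" "" == pxGetD cur "c" "") := by
        funext q; rw [hc]
      rw [hpred]
      have htw : List.takeWhile (fun q => pxGetD q "c" "" == pxGetD cur "c" "") (p :: t)
          = p :: List.takeWhile (fun q => pxGetD q "c" "" == pxGetD cur "c" "") t := by
        simp [hb]
      have hdw : List.dropWhile (fun q => pxGetD q "c" "" == pxGetD cur "c" "") (p :: t)
          = List.dropWhile (fun q => pxGetD q "c" "" == pxGetD cur "c" "") t := by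
        simp [hb]
      rw [htw, hdw]
      simp [outRuns, mergeRun]
    · have hb : (pxGetD p "c" "" == pxGetD cur "c" "") = false := by simpa using h
      rw [List.foldl_cons]
      simp only [stepA, hb, Bool.false_eq_true, if_false]
      rw [ih]
      have htw : List.takeWhile (fun q => pxGetD q "c" "" == pxGetD cur "c" "") (p :: t) = [] := by
        simp [hb]
      have hdw : List.dropWhile (fun q => pxGetD q "c" "" == pxGetD cur "c" "") (p :: t) = p :: t := by
        simp [hb]
      conv_rhs => rw [splitRuns, htw, hdw]
      simp only [outRuns, List.flatMap_cons, mergeRun, List.foldl_nil]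
      split <;> simp

-- ===== VERDICT (by name: the statement is the Claim_ definition above) =====
theorem regroup_pixels_spec : Claim_equal_regroup_pixels := by
  intro pixels _ _
  unfold Spec_regroup_pixels regroup_pixels regroup_pixels_alt
  cases pixels with
  | nil => simp [finishA, splitRuns]
  | cons p t =>
    rw [List.foldl_cons]
    show finishA (t.foldl stepA ([], some p)) = _
    rw [loopA_eq, foldlB_eq_outRuns]
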